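-- pv_equiv track=rewrite | github.com/m0mosenpai/dsagrind | AdventOfCode_2020/3_toboggan_trajectory.py | part_1
-- ===== SOURCE A (Python) =====
-- def part_1(data_list):
-- 	i = 0
-- 	j = 0
-- 	trees = 0
-- 	while i < len(data_list):
-- 		if j > len(data_list[0]) - 1:
-- 			j = j % len(data_list[0])
--
-- 		if data_list[i][j] == "#":
-- 			trees += 1
--
-- 		j += 3
-- 		i += 1
--
-- 	return trees
-- ===== SOURCE B (Python) =====
-- def part_1(data_list):
-- 	if not data_list:
-- 		return 0
-- 	w = len(data_list[0])
-- 	period = w // 3 if w % 3 == 0 else w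
-- 	trees = 0
-- 	for start in range(period):
-- 		col = (start * 3) % w
-- 		for i in range(start, len(data_list), period):
-- 			if data_list[i][col] == "#":
-- 				trees += 1
-- 	return trees
-- ===== Notes on version B (the rewrite author's own statement) =====
-- stated objective: alternative
-- what changed: Exploits the periodicity of the column sequence (3*i mod w has period w/gcd(3,w)): B iterates over the residue classes of rows modulo that period, checking each strided slice of rows at its one fixed column, instead of A's single sequential walk threading a wrapping column accumulator.
import Mathlib
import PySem

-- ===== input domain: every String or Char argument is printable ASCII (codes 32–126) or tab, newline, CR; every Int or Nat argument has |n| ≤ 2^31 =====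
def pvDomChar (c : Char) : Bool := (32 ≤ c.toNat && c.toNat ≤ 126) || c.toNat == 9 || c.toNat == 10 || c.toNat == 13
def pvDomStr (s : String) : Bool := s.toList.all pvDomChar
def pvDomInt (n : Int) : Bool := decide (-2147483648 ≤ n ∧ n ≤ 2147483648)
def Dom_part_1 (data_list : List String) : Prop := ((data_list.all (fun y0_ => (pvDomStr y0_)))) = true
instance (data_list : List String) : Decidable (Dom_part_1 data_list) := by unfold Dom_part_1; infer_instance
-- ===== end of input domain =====

-- B replaces A's sequential walk with a wrapping column accumulator by a
-- residue-class traversal: the column sequence 3*i mod w is periodic, so B visits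
-- the rows in strided classes, each class at its one fixed column (objective: alternative).

-- ===== PORT A =====
-- while loop transliterated as structural recursion on fuel = remaining iterations;
-- where Python would raise (mod by 0, index out of range) the PySem primitives yield
-- none/defaults — exactly those inputs are excluded by Pre_part_1.
def part1Loop (data_list : List String) (fuel : Nat) (i j trees : Int) : Int :=
  match fuel with
  | 0 => trees
  | n + 1 =>
    let w : Int := PySem.Str.len ((PySem.List.pyGet? data_list 0).getD "")
    let j1 : Int := if j > w - 1 then PySem.Int.mod j w else j
    let trees1 : Int :=
      if PySem.Str.pyGet? ((PySem.List.pyGet? data_list i).getD "") j1 = some '#'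
      then trees + 1 else trees
    part1Loop data_list n (i + 1) (j1 + 3) trees1

def part_1 (data_list : List String) : Int :=
  part1Loop data_list data_list.length 0 0 0

-- ===== PORT B =====
def part_1_alt (data_list : List String) : Int :=
  if data_list = [] then 0
  else
    let w : Int := PySem.Str.len ((PySem.List.pyGet? data_list 0).getD "")
    let period : Int := if PySem.Int.mod w 3 = 0 then PySem.Int.floordiv w 3 else w
    (PySem.List.pyRange 0 period 1).foldl (fun trees start =>
      let col : Int := PySem.Int.mod (start * 3) w
      (PySem.List.pyRange start (data_list.length : Int) period).foldl
        (fun t i =>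
          if PySem.Str.pyGet? ((PySem.List.pyGet? data_list i).getD "") col = some '#'
          then t + 1 else t) trees) 0

-- ===== PRECONDITION & SPEC =====
-- Pre_ is exactly where Python A returns: either the empty list, or the first row is
-- non-empty (else ZeroDivisionError on j % 0) and every row i is long enough to hold
-- column (i*3) % width (else IndexError).
def Pre_part_1 (data_list : List String) : Prop :=
  data_list = [] ∨
    (0 < PySem.Str.len ((PySem.List.pyGet? data_list 0).getD "") ∧
      ∀ p ∈ PySem.List.enumerate data_list 0,
        PySem.Int.mod (p.1 * 3) (PySem.Str.len ((PySem.List.pyGet? data_list 0).getD ""))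
          < PySem.Str.len p.2)
instance (data_list : List String) : Decidable (Pre_part_1 data_list) := by
  unfold Pre_part_1; infer_instance

def pvWitness_part_1 : List String := ["#.#", ".#.", "#.."]

def Spec_part_1 (data_list : List String) (out : Int) : Prop := out = part_1_alt data_list
instance (data_list : List String) (out : Int) : Decidable (Spec_part_1 data_list out) := by
  unfold Spec_part_1; infer_instance

-- ===== CLAIM (what is proved, stated in full; the proofs are below) =====
def Claim_equal_part_1 : Prop :=
  ∀ (data_list : List String), Dom_part_1 data_list → Pre_part_1 data_list →
    Spec_part_1 data_list (part_1 data_list)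

-- ===== LEMMAS AND PROOFS =====

-- The per-row tree indicator both sides compute: row i tested at column (i*3) % w.
def pvF (data_list : List String) (w : Int) (i : Int) : Int :=
  if PySem.Str.pyGet? ((PySem.List.pyGet? data_list i).getD "") (PySem.Int.mod (i * 3) w)
      = some '#' then 1 else 0

-- 'if c then t+1 else t' folded over a list is the initial value plus a 0/1 map-sum.
theorem foldl_ite_count {α : Type} (l : List α) (a : Int) (c : α → Prop) [DecidablePred c] :
    l.foldl (fun t x => if c x then t + 1 else t) a
      = a + (l.map (fun x => if c x then (1 : Int) else 0)).sum := by
  have h : (fun (t : Int) x => if c x then t + 1 else t)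
      = (fun t x => t + if c x then (1 : Int) else 0) := by
    funext t x; split <;> simp
  rw [h, PySem.List.foldl_add]

theorem sum_flatMap_int {α : Type} (l : List α) (f : α → List Int) :
    (l.flatMap f).sum = (l.map (fun a => (f a).sum)).sum := by
  induction l with
  | nil => rfl
  | cons a t ih => simp [List.flatMap_cons, ih]

-- Loop invariant for A: the accumulator j stays congruent to 3*|pre| modulo the width
-- and in [0, w+3); the remaining iterations add the indicator sum over the index range.
theorem part1Loop_eq (data_list : List String) (w : Int)
    (hw : w = PySem.Str.len ((PySem.List.pyGet? data_list 0).getD "")) (h0 : 0 < w) :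
    ∀ (rest pre : List String), data_list = pre ++ rest →
    ∀ (j trees : Int), 0 ≤ j → j < w + 3 →
      PySem.Int.mod j w = PySem.Int.mod (3 * (pre.length : Int)) w →
      part1Loop data_list rest.length (pre.length : Int) j trees =
        trees + ((PySem.List.pyRange (pre.length : Int) (data_list.length : Int) 1).map
          (pvF data_list w)).sum := by
  intro rest
  induction rest with
  | nil =>
    intro pre hsplit j trees _ _ _
    subst hsplit
    simp [part1Loop, PySem.List.pyRange_one_eq_nil]
  | cons r rs ih =>
    intro pre hsplit j trees hj0 hjw hmod
    have hmw : PySem.Int.mod j w = PySem.Int.mod (3 * (pre.length : Int)) w := hmod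
    have hj1 : (if j > w - 1 then PySem.Int.mod j w else j)
        = PySem.Int.mod (3 * (pre.length : Int)) w := by
      split_ifs with h
      · exact hmw
      · rw [← hmw, PySem.Int.mod_eq_emod_of_pos h0, Int.emod_eq_of_lt hj0 (by omega)]
    have hrow : PySem.List.pyGet? data_list (pre.length : Int) = some r := by
      rw [hsplit]; exact PySem.List.pyGet?_append_length pre rs r
    have hlt : (pre.length : Int) < (data_list.length : Int) := by
      rw [hsplit]; simp
    rw [show (r :: rs).length = rs.length + 1 from rfl]
    rw [part1Loop]
    simp only [← hw, hj1, hrow, Option.getD_some]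
    have hnext : PySem.Int.mod (PySem.Int.mod (3 * (pre.length : Int)) w + 3) w
        = PySem.Int.mod (3 * ((pre ++ [r]).length : Int)) w := by
      rw [PySem.Int.mod_eq_emod_of_pos h0, PySem.Int.mod_eq_emod_of_pos h0,
        PySem.Int.mod_eq_emod_of_pos h0]
      have hc : (((pre ++ [r]).length : Int)) = (pre.length : Int) + 1 := by simp
      rw [hc]
      calc (3 * (pre.length : Int)) % w + 3
          ≡ 3 * (pre.length : Int) + 3 [ZMOD w] := Int.ModEq.add_right 3 (Int.mod_modEq _ _)
        _ = 3 * ((pre.length : Int) + 1) := by ring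
    have hrec := ih (pre ++ [r]) (by simpa using hsplit)
      (PySem.Int.mod (3 * (pre.length : Int)) w + 3)
      (if PySem.Str.pyGet? r (PySem.Int.mod (3 * (pre.length : Int)) w) = some '#'
        then trees + 1 else trees)
      (by have := PySem.Int.mod_nonneg (3 * (pre.length : Int)) h0; omega)
      (by have := PySem.Int.mod_lt (3 * (pre.length : Int)) h0; omega)
      hnext
    have hlen : ((pre ++ [r]).length : Int) = (pre.length : Int) + 1 := by simp
    rw [hlen] at hrec
    rw [hrec]
    rw [PySem.List.pyRange_one_cons hlt]
    have hFval : pvF data_list w (pre.length : Int)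
        = (if PySem.Str.pyGet? r (PySem.Int.mod (3 * (pre.length : Int)) w) = some '#'
            then (1 : Int) else 0) := by
      unfold pvF
      rw [hrow]
      have : ((pre.length : Int) * 3) = 3 * (pre.length : Int) := by ring
      rw [this]
      rfl
    simp only [List.map_cons, List.sum_cons, hFval]
    split_ifs <;> ring

-- The strided classes [s, s+per, s+2per, …) for s < per partition [0, n).
theorem classes_perm (n per : Int) (hper : 0 < per) :
    ((PySem.List.pyRange 0 per 1).flatMap (fun s => PySem.List.pyRange s n per)).Perm
      (PySem.List.pyRange 0 n 1) := by
  have hnd1 : ((PySem.List.pyRange 0 per 1).flatMap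
      (fun s => PySem.List.pyRange s n per)).Nodup := by
    rw [List.nodup_flatMap]
    constructor
    · intro s _
      rw [PySem.List.pyRange_of_pos _ _ hper]
      exact (List.nodup_range).map (fun a b h => by
        have : per * (a : Int) = per * b := by omega
        exact_mod_cast mul_left_cancel₀ hper.ne' this)
    · have hpw := PySem.List.pairwise_lt_pyRange_one 0 per
      refine hpw.imp_of_mem ?_
      intro a b ha hb hab x hxa hxb
      rcases (PySem.List.mem_pyRange_iff_of_pos hper x).1 hxa with ⟨hax, _, ka, hka⟩
      rcases (PySem.List.mem_pyRange_iff_of_pos hper x).1 hxb with ⟨hbx, _, kb, hkb⟩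
      rcases (PySem.List.mem_pyRange_one).1 ha with ⟨ha0, hap⟩
      rcases (PySem.List.mem_pyRange_one).1 hb with ⟨hb0, hbp⟩
      have hd : per ∣ b - a := ⟨ka - kb, by rw [mul_sub]; omega⟩
      have := Int.le_of_dvd (by omega) hd
      omega
  refine (List.perm_ext_iff_of_nodup hnd1 (PySem.List.nodup_pyRange_one 0 n)).2 ?_
  intro x
  rw [List.mem_flatMap, PySem.List.mem_pyRange_one]
  constructor
  · rintro ⟨s, hs, hx⟩
    rcases (PySem.List.mem_pyRange_iff_of_pos hper x).1 hx with ⟨hsx, hxn, _⟩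
    rcases (PySem.List.mem_pyRange_one).1 hs with ⟨hs0, _⟩
    exact ⟨by omega, hxn⟩
  · rintro ⟨hx0, hxn⟩
    refine ⟨x % per, ?_, ?_⟩
    · exact (PySem.List.mem_pyRange_one).2
        ⟨Int.emod_nonneg x hper.ne', Int.emod_lt_of_pos x hper⟩
    · refine (PySem.List.mem_pyRange_iff_of_pos hper x).2 ⟨?_, hxn, ?_⟩
      · have h1 : x % per + per * (x / per) = x := Int.emod_add_mul_ediv x per
        have h2 : 0 ≤ x / per := Int.ediv_nonneg hx0 hper.le
        have h3 : 0 ≤ per * (x / per) := mul_nonneg hper.le h2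
        linarith
      · exact ⟨x / per, by have := Int.emod_add_mul_ediv x per; linarith⟩

-- B computes the same indicator sum over [0, n), grouped by residue class.
theorem part1_alt_eq_sum (data_list : List String)
    (hne : data_list ≠ [])
    (h0 : 0 < PySem.Str.len ((PySem.List.pyGet? data_list 0).getD "")) :
    part_1_alt data_list =
      ((PySem.List.pyRange 0 (data_list.length : Int) 1).map
        (pvF data_list (PySem.Str.len ((PySem.List.pyGet? data_list 0).getD "")))).sum := by
  set w : Int := PySem.Str.len ((PySem.List.pyGet? data_list 0).getD "") with hw
  set n : Int := (data_list.length : Int) with hn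
  set per : Int := if PySem.Int.mod w 3 = 0 then PySem.Int.floordiv w 3 else w with hperdef
  have hper : 0 < per ∧ w ∣ 3 * per := by
    rw [hperdef]
    split_ifs with h
    · have h3 : (3 : Int) ∣ w := (PySem.Int.mod_eq_zero_iff_dvd w 3).1 h
      rw [PySem.Int.floordiv_eq_ediv_of_pos (by norm_num)]
      have hmul : 3 * (w / 3) = w := Int.mul_ediv_cancel' h3
      constructor
      · have : (3 : Int) ≤ w := Int.le_of_dvd h0 h3
        omega
      · rw [hmul]
    · exact ⟨h0, ⟨3, by ring⟩⟩
  -- unfold the two folds into a sum of per-class sums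
  have hstep : part_1_alt data_list =
      ((PySem.List.pyRange 0 per 1).map (fun s =>
        ((PySem.List.pyRange s n per).map (fun i =>
          if PySem.Str.pyGet? ((PySem.List.pyGet? data_list i).getD "")
              (PySem.Int.mod (s * 3) w) = some '#' then (1 : Int) else 0)).sum)).sum := by
    rw [part_1_alt, if_neg hne]
    simp only [← hw, ← hn, ← hperdef]
    have hfun : (fun (trees : Int) start =>
        (PySem.List.pyRange start n per).foldl
          (fun t i =>
            if PySem.Str.pyGet? ((PySem.List.pyGet? data_list i).getD "")
                (PySem.Int.mod (start * 3) w) = some '#' then t + 1 else t) trees)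
      = (fun trees start => trees +
          ((PySem.List.pyRange start n per).map (fun i =>
            if PySem.Str.pyGet? ((PySem.List.pyGet? data_list i).getD "")
                (PySem.Int.mod (start * 3) w) = some '#' then (1 : Int) else 0)).sum) := by
      funext trees start
      exact foldl_ite_count _ _ _
    rw [hfun, PySem.List.foldl_add, zero_add]
  rw [hstep]
  -- within one class the column is constant: replace it by the per-row column
  have hcong : ∀ s ∈ PySem.List.pyRange 0 per 1,
      ((PySem.List.pyRange s n per).map (fun i =>
        if PySem.Str.pyGet? ((PySem.List.pyGet? data_list i).getD "")
            (PySem.Int.mod (s * 3) w) = some '#' then (1 : Int) else 0)).sum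
        = ((PySem.List.pyRange s n per).map (pvF data_list w)).sum := by
    intro s hs
    congr 1
    apply List.map_congr_left
    intro i hi
    rcases (PySem.List.mem_pyRange_iff_of_pos hper.1 i).1 hi with ⟨hsi, _, k, hk⟩
    have hcol : PySem.Int.mod (s * 3) w = PySem.Int.mod (i * 3) w := by
      rw [PySem.Int.mod_eq_emod_of_pos h0, PySem.Int.mod_eq_emod_of_pos h0]
      have hdvd : w ∣ i * 3 - s * 3 := by
        rcases hper.2 with ⟨m, hm⟩
        exact ⟨m * k, by linear_combination 3 * hk + k * hm⟩
      exact Int.modEq_iff_dvd.2 hdvd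
    rw [hcol]
    rfl
  rw [List.map_congr_left hcong]
  rw [← sum_flatMap_int, ← List.map_flatMap]
  exact List.Perm.sum_eq (List.Perm.map _ (classes_perm n per hper.1))

-- ===== VERDICT (by name: the statement is the Claim_ definition above) =====
theorem part_1_spec : Claim_equal_part_1 := by
  intro data_list _ hpre
  unfold Spec_part_1
  rcases hpre with h | ⟨h0, _⟩
  · subst h; rfl
  · have hne : data_list ≠ [] := by
      intro h; subst h; simp [PySem.Str.len] at h0
    have hA := part1Loop_eq data_list _ rfl h0 data_list [] rfl 0 0 le_rfl (by omega)
      (by norm_num)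
    norm_num at hA
    rw [part_1, hA, part1_alt_eq_sum data_list hne h0]
    simp [PySem.Str.len_eq]
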